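-- pv_equiv track=rewrite | github.com/dpklinge/PolymarketPredictorTest | polymarket_predictor/features.py | _select_category_from_tags
-- ===== SOURCE A (Python) =====
-- from typing import Any
--
-- GENERIC_TAGS = {"other", "featured", "breaking", "news"}
--
-- PREFERRED_CATEGORIES = {
--     "politics",
--     "crypto",
--     "sports",
--     "business",
--     "tech",
--     "technology",
--     "science",
--     "culture",
--     "pop-culture",
--     "world",
--     "finance",
--     "economics",
-- }
--
-- def _select_category_from_tags(tags: list[dict[str, Any]]) -> str | None:
--     normalized: list[str] = []
--     for tag in tags:
--         label = (tag.get("slug") or tag.get("label") or "").strip().lower()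
--         if label:
--             normalized.append(label)
--
--     for label in normalized:
--         if label in PREFERRED_CATEGORIES:
--             return label
--
--     for label in normalized:
--         if label not in GENERIC_TAGS:
--             return label
--     return None
-- ===== SOURCE B (Python) =====
-- GENERIC_TAGS = {"other", "featured", "breaking", "news"}
--
-- PREFERRED_CATEGORIES = {
--     "politics",
--     "crypto",
--     "sports",
--     "business",
--     "tech",
--     "technology",
--     "science",
--     "culture",
--     "pop-culture",
--     "world",
--     "finance",
--     "economics",
-- }
--
--
-- def _select_category_from_tags(tags):
--     # Single pass: return immediately on a preferred label, remember the
--     # first non-generic label as a fallback.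
--     fallback = None
--     for tag in tags:
--         label = (tag.get("slug") or tag.get("label") or "").strip().lower()
--         if not label:
--             continue
--         if label in PREFERRED_CATEGORIES:
--             return label
--         if fallback is None and label not in GENERIC_TAGS:
--             fallback = label
--     return fallback
-- ===== Notes on version B (the rewrite author's own statement) =====
-- stated objective: simpler
-- what changed: Replaced the build-a-normalized-list-then-two-scans structure by a single pass over the tags that returns on the first preferred label and keeps the first non-generic label as a fallback accumulator.
import Mathlib
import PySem

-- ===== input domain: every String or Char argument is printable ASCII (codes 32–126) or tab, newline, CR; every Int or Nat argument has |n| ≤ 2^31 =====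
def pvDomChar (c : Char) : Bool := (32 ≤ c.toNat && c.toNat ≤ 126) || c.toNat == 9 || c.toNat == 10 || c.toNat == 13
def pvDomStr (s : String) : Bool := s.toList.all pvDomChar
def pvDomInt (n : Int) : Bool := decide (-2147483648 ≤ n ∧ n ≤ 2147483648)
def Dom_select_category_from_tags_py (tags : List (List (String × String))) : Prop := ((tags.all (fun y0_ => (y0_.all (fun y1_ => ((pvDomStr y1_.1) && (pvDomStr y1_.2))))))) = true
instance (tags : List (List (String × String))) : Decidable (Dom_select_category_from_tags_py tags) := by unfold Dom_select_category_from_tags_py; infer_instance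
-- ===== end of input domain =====

-- B replaces A's normalize-then-two-scans structure by a single pass with a fallback accumulator; objective: simpler.


-- shared context: the two module-level sets and the label normalization both Pythons contain verbatim
def pvPreferred : List String :=
  ["politics", "crypto", "sports", "business", "tech", "technology", "science",
   "culture", "pop-culture", "world", "finance", "economics"]

def pvGeneric : List String := ["other", "featured", "breaking", "news"]

-- tag.get(k) with Python truthiness: none for a missing key or an empty string (dict = assoc list, first match)
def pvTruthyGet (tag : List (String × String)) (k : String) : Option String :=
  match tag.find? (fun p => p.1 == k) with
  | some (_, v) => if v = "" then none else some v
  | none => none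

-- (tag.get("slug") or tag.get("label") or "").strip().lower()
def pvLabel (tag : List (String × String)) : String :=
  PySem.Str.lower (PySem.Str.strip
    (((pvTruthyGet tag "slug").orElse (fun _ => pvTruthyGet tag "label")).getD ""))

-- ===== PORT A =====
def select_category_from_tags_py (tags : List (List (String × String))) : Option String :=
  let normalized := tags.foldl (fun acc tag =>
      let label := pvLabel tag
      if label ≠ "" then acc ++ [label] else acc) []
  match normalized.find? (fun l => pvPreferred.contains l) with
  | some l => some l
  | none => normalized.find? (fun l => !pvGeneric.contains l)

-- ===== PORT B =====
def pvAltLoop (fallback : Option String) : List (List (String × String)) → Option String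
  | [] => fallback
  | tag :: rest =>
    let label := pvLabel tag
    if label = "" then pvAltLoop fallback rest
    else if pvPreferred.contains label then some label
    else if fallback.isNone && !pvGeneric.contains label then pvAltLoop (some label) rest
    else pvAltLoop fallback rest

def select_category_from_tags_py_alt (tags : List (List (String × String))) : Option String :=
  pvAltLoop none tags

-- ===== PRECONDITION & SPEC =====
def Spec_select_category_from_tags_py (tags : List (List (String × String))) (out : Option String) : Prop := out = select_category_from_tags_py_alt tags
instance (tags : List (List (String × String))) (out : Option String) : Decidable (Spec_select_category_from_tags_py tags out) := by unfold Spec_select_category_from_tags_py; infer_instance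

-- ===== CLAIM (what is proved, stated in full; the proofs are below) =====
def Claim_equal_select_category_from_tags_py : Prop := ∀ (tags : List (List (String × String))), Dom_select_category_from_tags_py tags → Spec_select_category_from_tags_py tags (select_category_from_tags_py tags)

-- ===== LEMMAS AND PROOFS =====

-- the normalized label list both programs conceptually work over
def pvLabels (tags : List (List (String × String))) : List String :=
  (tags.map pvLabel).filter (fun l => l ≠ "")

lemma pvLabels_cons (t : List (String × String)) (ts : List (List (String × String))) :
    pvLabels (t :: ts) = if pvLabel t = "" then pvLabels ts else pvLabel t :: pvLabels ts := by
  by_cases h : pvLabel t = "" <;> simp [pvLabels, h]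

lemma pvFoldl_labels (tags : List (List (String × String))) (acc : List String) :
    tags.foldl (fun acc tag =>
      let label := pvLabel tag
      if label ≠ "" then acc ++ [label] else acc) acc = acc ++ pvLabels tags := by
  induction tags generalizing acc with
  | nil => simp [pvLabels]
  | cons t ts ih =>
    simp only [List.foldl_cons]
    rw [pvLabels_cons]
    by_cases h : pvLabel t = ""
    · rw [if_neg (by simp [h]), if_pos h, ih]
    · rw [if_pos h, if_neg h, ih, List.append_assoc]
      rfl

-- A's port in terms of the normalized label list
lemma pvA_eq (tags : List (List (String × String))) :
    select_category_from_tags_py tags =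
      match (pvLabels tags).find? (fun l => pvPreferred.contains l) with
      | some l => some l
      | none => (pvLabels tags).find? (fun l => !pvGeneric.contains l) := by
  unfold select_category_from_tags_py
  rw [pvFoldl_labels]
  rfl

-- characterization of B's single-pass loop via the normalized label list
lemma pvAlt_eq (tags : List (List (String × String))) (fb : Option String) :
    pvAltLoop fb tags =
      match (pvLabels tags).find? (fun l => pvPreferred.contains l) with
      | some l => some l
      | none => fb.orElse (fun _ => (pvLabels tags).find? (fun l => !pvGeneric.contains l)) := by
  induction tags generalizing fb with
  | nil => cases fb <;> rfl
  | cons t ts ih =>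
    simp only [pvAltLoop]
    rw [pvLabels_cons]
    by_cases h0 : pvLabel t = ""
    · rw [if_pos h0, if_pos h0]; exact ih fb
    · rw [if_neg h0, if_neg h0]
      cases hp : pvPreferred.contains (pvLabel t) with
      | true => rw [if_pos rfl, List.find?_cons_of_pos hp]
      | false =>
        rw [if_neg (by simp), List.find?_cons_of_neg (by simp only [hp]; exact Bool.false_ne_true)]
        cases hg : pvGeneric.contains (pvLabel t) with
        | true =>
          rw [show (fb.isNone && !true) = false by simp, if_neg (by simp), ih fb]
          rw [List.find?_cons_of_neg (p := fun l => !pvGeneric.contains l)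
                (by simp only [hg, Bool.not_true]; exact Bool.false_ne_true)]
        | false =>
          cases fb with
          | some f =>
            rw [show ((some f : Option String).isNone && !false) = false by rfl, if_neg (by simp),
              ih (some f)]
            simp only [Option.orElse_some]
          | none =>
            rw [show ((none : Option String).isNone && !false) = true by rfl, if_pos rfl,
              ih (some (pvLabel t)),
              List.find?_cons_of_pos (p := fun l => !pvGeneric.contains l)
                (by simp only [hg, Bool.not_false])]
            simp only [Option.orElse_some, Option.orElse_none]

-- ===== VERDICT (by name: the statement is the Claim_ definition above) =====
theorem select_category_from_tags_py_spec : Claim_equal_select_category_from_tags_py := by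
  intro tags _
  unfold Spec_select_category_from_tags_py select_category_from_tags_py_alt
  rw [pvA_eq, pvAlt_eq]
  cases (pvLabels tags).find? (fun l => pvPreferred.contains l) <;> rfl
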